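-- pv_equiv track=rewrite | github.com/ypsu/latex-to-unicode | convert.py | convert_superscripts
-- ===== SOURCE A (Python) =====
-- def convert_superscripts(s):
-- 	s = list(s)
-- 	ss = ""
-- 	mode_normal, mode_caret, mode_long = range(3)
-- 	mode = mode_normal
-- 	for ch in s:
-- 		if mode == mode_normal and ch == '^':
-- 			mode = mode_caret
-- 			continue
-- 		elif mode == mode_caret and ch == '{':
-- 			mode = mode_long
-- 			continue
-- 		elif mode == mode_caret:
-- 			ss += translate_if_possible(ch, supscripts)
-- 			mode = mode_normal
-- 			continue
-- 		elif mode == mode_long and ch == '}':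
-- 			mode = mode_normal
-- 			continue
--
-- 		if mode == mode_normal:
-- 			ss += ch
-- 		else:
-- 			ss += translate_if_possible(ch, supscripts)
-- 	return ss
--
-- def translate_if_possible(ch, d):
-- 	if ch in d:
-- 		return d[ch]
-- 	return ch
--
-- supscripts = {}
-- ===== SOURCE B (Python) =====
-- supscripts = {}
--
-- def translate_if_possible(ch, d):
-- 	if ch in d:
-- 		return d[ch]
-- 	return ch
--
-- def convert_superscripts(s):
-- 	out = []
-- 	i = 0
-- 	n = len(s)
-- 	while i < n:
-- 		c = s[i]
-- 		if c != '^':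
-- 			out.append(c)
-- 			i += 1
-- 			continue
-- 		i += 1
-- 		if i == n:
-- 			break
-- 		if s[i] == '{':
-- 			i += 1
-- 			while i < n and s[i] != '}':
-- 				out.append(translate_if_possible(s[i], supscripts))
-- 				i += 1
-- 			if i < n:
-- 				i += 1
-- 		else:
-- 			out.append(translate_if_possible(s[i], supscripts))
-- 			i += 1
-- 	return "".join(out)
-- ===== Notes on version B (the rewrite author's own statement) =====
-- stated objective: alternative
-- what changed: Replaced A's three-state mode machine (one fold over the characters carrying a mode flag) by an explicit index cursor with lookahead: on '^' B advances and handles the single-char or the '{..}' group case with a dedicated inner loop, so no mode variable exists.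
import Mathlib
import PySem

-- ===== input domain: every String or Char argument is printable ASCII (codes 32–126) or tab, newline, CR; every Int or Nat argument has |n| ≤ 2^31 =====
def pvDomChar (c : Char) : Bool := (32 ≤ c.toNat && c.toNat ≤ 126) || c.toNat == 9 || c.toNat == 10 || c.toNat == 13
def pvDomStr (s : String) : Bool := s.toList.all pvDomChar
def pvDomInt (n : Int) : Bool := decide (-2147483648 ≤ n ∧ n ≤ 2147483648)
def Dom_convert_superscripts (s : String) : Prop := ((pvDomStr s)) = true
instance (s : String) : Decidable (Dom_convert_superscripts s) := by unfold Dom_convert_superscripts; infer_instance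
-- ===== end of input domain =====

-- B replaces A's mode-flag state machine by an explicit cursor with lookahead on '^'; alternative decomposition, same cost.

-- ===== PORT A =====
-- supscripts = {} (empty in this module)
def supscriptsA : PySem.Dict String String := PySem.Dict.empty

def translate_if_possibleA (ch : String) (d : PySem.Dict String String) : String :=
  match PySem.Dict.get? d ch with
  | some v => v
  | none => ch

-- one step of A's for-loop: state = (mode, ss); modes 0/1/2 = normal/caret/long
def stepA (st : Nat × List Char) (ch : Char) : Nat × List Char :=
  let mode := st.1
  let ss := st.2
  if mode = 0 ∧ ch = '^' then (1, ss)
  else if mode = 1 ∧ ch = '{' then (2, ss)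
  else if mode = 1 then (0, ss ++ (translate_if_possibleA (String.mk [ch]) supscriptsA).toList)
  else if mode = 2 ∧ ch = '}' then (0, ss)
  else if mode = 0 then (mode, ss ++ [ch])
  else (mode, ss ++ (translate_if_possibleA (String.mk [ch]) supscriptsA).toList)

def convert_superscripts (s : String) : String :=
  String.mk (s.toList.foldl stepA (0, [])).2

-- ===== PORT B =====
def supscriptsB : PySem.Dict String String := PySem.Dict.empty

def translate_if_possibleB (ch : String) (d : PySem.Dict String String) : String :=
  match PySem.Dict.get? d ch with
  | some v => v
  | none => ch

def trB (ch : Char) : List Char := (translate_if_possibleB (String.mk [ch]) supscriptsB).toList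

-- inner while loop of B: translate characters until '}' (skipped) or end; returns (output, rest)
def altInner : List Char → List Char × List Char
  | [] => ([], [])
  | c :: r => if c = '}' then ([], r) else
      let p := altInner r
      (trB c ++ p.1, p.2)

theorem altInner_len : ∀ l : List Char, (altInner l).2.length ≤ l.length := by
  intro l
  induction l with
  | nil => simp [altInner]
  | cons c r ih => by_cases h : c = '}' <;> simp [altInner, h] <;> omega

-- outer while loop of B over the cursor, as recursion on the remaining characters
def altGo : List Char → List Char
  | [] => []
  | c :: rest =>
    if c = '^' then
      match rest with
      | [] => []
      | d :: r =>
        if d = '{' then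
          let p := altInner r
          p.1 ++ altGo p.2
        else trB d ++ altGo r
    else c :: altGo rest
termination_by l => l.length
decreasing_by
  · simpa using Nat.lt_succ_of_le (Nat.le_succ_of_le (altInner_len r))
  · simp
  · simp

def convert_superscripts_alt (s : String) : String :=
  String.mk (altGo s.toList)

-- ===== PRECONDITION & SPEC =====
def Spec_convert_superscripts (s : String) (out : String) : Prop := out = convert_superscripts_alt s
instance (s : String) (out : String) : Decidable (Spec_convert_superscripts s out) := by unfold Spec_convert_superscripts; infer_instance

-- ===== CLAIM (what is proved, stated in full; the proofs are below) =====
def Claim_equal_convert_superscripts : Prop := ∀ (s : String), Dom_convert_superscripts s → Spec_convert_superscripts s (convert_superscripts s)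

-- ===== LEMMAS AND PROOFS =====

-- what mode 1 (just saw '^') produces on the remaining input, in B's terms
def caretCont : List Char → List Char
  | [] => []
  | d :: r =>
    if d = '{' then (altInner r).1 ++ altGo (altInner r).2
    else trB d ++ altGo r

theorem altGo_caret (rest : List Char) : altGo ('^' :: rest) = caretCont rest := by
  cases rest with
  | nil => simp [altGo, caretCont]
  | cons d r => by_cases h : d = '{' <;> simp [altGo, caretCont, h]

theorem altGo_cons (c : Char) (rest : List Char) (h : c ≠ '^') :
    altGo (c :: rest) = c :: altGo rest := by
  cases rest <;> simp [altGo, h]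

-- the key invariant: A's foldl from each mode computes B's corresponding continuation
theorem key (l : List Char) : ∀ acc : List Char,
    ((l.foldl stepA (0, acc)).2 = acc ++ altGo l) ∧
    ((l.foldl stepA (1, acc)).2 = acc ++ caretCont l) ∧
    ((l.foldl stepA (2, acc)).2 = acc ++ (altInner l).1 ++ altGo (altInner l).2) := by
  induction l with
  | nil => intro acc; simp [altGo, caretCont, altInner]
  | cons ch rest ih =>
    intro acc
    refine ⟨?_, ?_, ?_⟩
    · by_cases h : ch = '^'
      · simpa [stepA, h, altGo_caret] using (ih acc).2.1
      · simpa [stepA, h, altGo_cons ch rest h] using (ih (acc ++ [ch])).1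
    · by_cases h : ch = '{'
      · simpa [stepA, h, caretCont] using (ih acc).2.2
      · simpa [stepA, h, caretCont, trB, List.append_assoc] using (ih (acc ++ trB ch)).1
    · by_cases h : ch = '}'
      · simpa [stepA, h, altInner] using (ih acc).1
      · simpa [stepA, h, altInner, trB, List.append_assoc] using (ih (acc ++ trB ch)).2.2

-- ===== VERDICT (by name: the statement is the Claim_ definition above) =====
theorem convert_superscripts_spec : Claim_equal_convert_superscripts := by
  intro s _
  unfold Spec_convert_superscripts convert_superscripts convert_superscripts_alt
  simpa using congrArg String.mk ((key s.toList []).1)
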